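-- pv_equiv track=rewrite | github.com/sunath2711/LeetcodeProblemSolving | mice_and_cheese.py | miceAndCheese
-- ===== SOURCE A (Python) =====
-- def miceAndCheese(reward1, reward2, k):
--     """
--     :type reward1: List[int]
--     :type reward2: List[int]
--     :type k: int
--     :rtype: int
--     """
--     arr = zip(reward1, reward2)
--     result = 0
--     sortedarr = sorted(arr, key=lambda x: x[0]-x[1], reverse = True)
--     for pair in sortedarr:
--         if k:
--             k -= 1
--             result += pair[0]
--         else:
--             result += pair[1]
--     return result
-- ===== SOURCE B (Python) =====
-- def _sum_k_largest(vals, k):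
--     # sum of the k largest values of vals (as a multiset), k <= len(vals);
--     # quickselect-style three-way partitioning, no sort
--     total = 0
--     while k > 0:
--         if k == len(vals):
--             return total + sum(vals)
--         pivot = vals[len(vals) // 2]
--         hi = [v for v in vals if v > pivot]
--         if k <= len(hi):
--             vals = hi
--             continue
--         eq = sum(1 for v in vals if v == pivot)
--         if k <= len(hi) + eq:
--             return total + sum(hi) + pivot * (k - len(hi))
--         total += sum(hi) + pivot * eq
--         k -= len(hi) + eq
--         vals = [v for v in vals if v < pivot]
--     return total
--
--
-- def miceAndCheese(reward1, reward2, k):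
--     pairs = list(zip(reward1, reward2))
--     k = min(k, len(pairs))
--     base = sum(b for _, b in pairs)
--     return base + _sum_k_largest([a - b for a, b in pairs], k)
-- ===== Notes on version B (the rewrite author's own statement) =====
-- stated objective: alternative
-- what changed: A sorts all (reward1,reward2) pairs by their difference and walks the sorted list with a countdown; B computes sum(reward2) over the pairs once and adds the sum of the min(k,n) largest reward1-reward2 differences found by quickselect-style three-way partitioning, with no sort.
-- intended difference: For k < 0 (an invalid pick count) on pairs whose reward1 and reward2 totals differ, A's truthiness countdown never hits 0 and hands EVERY mouse its type-1 reward, returning the sum of reward1 over the zipped pairs; B takes no type-1 rewards and returns the sum of reward2, the intended value for picking at most zero type-1 items. — e.g. on miceAndCheese([1], [0], -1): A returns 1, B returns 0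
import Mathlib
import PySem

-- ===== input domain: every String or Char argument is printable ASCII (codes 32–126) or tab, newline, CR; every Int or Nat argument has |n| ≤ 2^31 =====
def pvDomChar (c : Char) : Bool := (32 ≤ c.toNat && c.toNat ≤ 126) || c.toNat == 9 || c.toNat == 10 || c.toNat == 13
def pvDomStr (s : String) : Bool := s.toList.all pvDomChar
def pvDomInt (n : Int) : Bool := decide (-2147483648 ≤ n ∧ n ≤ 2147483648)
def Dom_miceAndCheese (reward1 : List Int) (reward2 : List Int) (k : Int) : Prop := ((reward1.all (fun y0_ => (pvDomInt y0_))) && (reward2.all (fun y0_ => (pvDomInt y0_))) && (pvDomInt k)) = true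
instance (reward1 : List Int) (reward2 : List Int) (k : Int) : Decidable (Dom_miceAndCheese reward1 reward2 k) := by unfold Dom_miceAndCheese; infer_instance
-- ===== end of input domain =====

-- B replaces A's sort of the zipped pairs with sum(reward2) plus a quickselect-style
-- partition that sums the min(k,n) largest reward1-reward2 differences without sorting
-- (objective: alternative algorithm); for k < 0 the two differ as stated at D_ below.

-- ===== PORT A =====
def pvstep (st : Int × Int) (pair : Int × Int) : Int × Int :=
  if st.2 ≠ 0 then (st.1 + pair.1, st.2 - 1) else (st.1 + pair.2, st.2)

def miceAndCheese (reward1 : List Int) (reward2 : List Int) (k : Int) : Int :=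
  let arr := reward1.zip reward2
  let sortedarr := PySem.List.sorted arr (fun x => x.1 - x.2) true
  (sortedarr.foldl pvstep (0, k)).1

-- ===== PORT B =====
def sumKLargest (vals : List Int) (k : Int) (total : Int) : Int :=
  if k > 0 then
    if k = (vals.length : Int) then total + vals.sum
    else
      match _h : PySem.List.pyGet? vals (PySem.Int.floordiv (vals.length : Int) 2) with
      | none => total  -- unreachable: the caller maintains 0 < k ≤ len(vals), so here 0 < len(vals)
      | some pivot =>
        let hi := vals.filter (fun v => v > pivot)
        if k ≤ (hi.length : Int) then sumKLargest hi k total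
        else
          let eqn := vals.countP (fun v => v = pivot)
          if k ≤ (hi.length : Int) + eqn then total + hi.sum + pivot * (k - hi.length)
          else sumKLargest (vals.filter (fun v => v < pivot))
                 (k - hi.length - eqn) (total + hi.sum + pivot * eqn)
  else total
termination_by vals.length
decreasing_by
  all_goals have hm := PySem.List.mem_of_pyGet?_eq_some (h := _h)
  all_goals simp only [List.length_unattach]
  all_goals rw [← List.length_attach (l := vals)]
  all_goals exact List.length_filter_lt_length_iff_exists.mpr ⟨⟨pivot, hm⟩, List.mem_attach _ _, by simp⟩

def miceAndCheese_alt (reward1 : List Int) (reward2 : List Int) (k : Int) : Int :=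
  let pairs := reward1.zip reward2
  let k' := min k (pairs.length : Int)
  let base := (pairs.map (fun p => p.2)).sum
  base + sumKLargest (pairs.map (fun p => p.1 - p.2)) k' 0

-- ===== PRECONDITION & SPEC =====
-- For k < 0 (an invalid pick count) on pairs whose reward1 and reward2 totals differ, A's
-- truthiness countdown never hits 0 and hands EVERY mouse its type-1 reward, returning the
-- sum of reward1 over the zipped pairs; B takes no type-1 rewards and returns the sum of
-- reward2, the intended value for picking at most zero type-1 items.
def D_miceAndCheese (reward1 : List Int) (reward2 : List Int) (k : Int) : Prop :=
  k < 0 ∧ ((reward1.zip reward2).map Prod.fst).sum ≠ ((reward1.zip reward2).map Prod.snd).sum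
instance (reward1 : List Int) (reward2 : List Int) (k : Int) : Decidable (D_miceAndCheese reward1 reward2 k) := by unfold D_miceAndCheese; infer_instance

def Spec_miceAndCheese (reward1 : List Int) (reward2 : List Int) (k : Int) (out : Int) : Prop := ¬ D_miceAndCheese reward1 reward2 k → out = miceAndCheese_alt reward1 reward2 k
instance (reward1 : List Int) (reward2 : List Int) (k : Int) (out : Int) : Decidable (Spec_miceAndCheese reward1 reward2 k out) := by unfold Spec_miceAndCheese; infer_instance

def pvDiffWitness_miceAndCheese : List Int × List Int × Int := ([1], [0], -1)
def pvDiffWitnessOut_miceAndCheese : Int × Int := (1, 0)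

-- ===== CLAIM =====
def Claim_unchanged_miceAndCheese : Prop := ∀ (reward1 : List Int) (reward2 : List Int) (k : Int), Dom_miceAndCheese reward1 reward2 k → Spec_miceAndCheese reward1 reward2 k (miceAndCheese reward1 reward2 k)
def Claim_changed_miceAndCheese : Prop := Dom_miceAndCheese (pvDiffWitness_miceAndCheese.1) (pvDiffWitness_miceAndCheese.2.1) (pvDiffWitness_miceAndCheese.2.2) ∧ D_miceAndCheese (pvDiffWitness_miceAndCheese.1) (pvDiffWitness_miceAndCheese.2.1) (pvDiffWitness_miceAndCheese.2.2) ∧ miceAndCheese (pvDiffWitness_miceAndCheese.1) (pvDiffWitness_miceAndCheese.2.1) (pvDiffWitness_miceAndCheese.2.2) = pvDiffWitnessOut_miceAndCheese.1 ∧ miceAndCheese_alt (pvDiffWitness_miceAndCheese.1) (pvDiffWitness_miceAndCheese.2.1) (pvDiffWitness_miceAndCheese.2.2) = pvDiffWitnessOut_miceAndCheese.2 ∧ pvDiffWitnessOut_miceAndCheese.1 ≠ pvDiffWitnessOut_miceAndCheese.2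
def Claim_exact_miceAndCheese : Prop := ∀ (reward1 : List Int) (reward2 : List Int) (k : Int), Dom_miceAndCheese reward1 reward2 k → D_miceAndCheese reward1 reward2 k → miceAndCheese reward1 reward2 k ≠ miceAndCheese_alt reward1 reward2 k

-- ===== LEMMAS AND PROOFS =====

-- Python's sorted(xs, reverse=True) on plain ints; the common yardstick for both sides.
def descSort (l : List Int) : List Int := PySem.List.sorted l (fun x => x) true

-- sum of the t largest elements of l
def takeSum (l : List Int) (t : Nat) : Int := ((descSort l).take t).sum

lemma descSort_perm (l : List Int) : (descSort l).Perm l := PySem.List.sorted_perm l _ true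

lemma descSort_pairwise (l : List Int) : (descSort l).Pairwise (fun a b => b ≤ a) :=
  PySem.List.sorted_pairwise_rev l (fun x => x)

-- any ≥-sorted rearrangement of l IS descSort l
lemma descSort_eq_of_perm (l ys : List Int) (hp : ys.Perm l)
    (hs : ys.Pairwise (fun a b : Int => b ≤ a)) : descSort l = ys :=
  List.Perm.eq_of_pairwise (fun _ _ _ _ h1 h2 => le_antisymm h2 h1)
    (descSort_pairwise l) hs ((descSort_perm l).trans hp.symm)

-- the three-way partition of l at a pivot is a permutation of l
lemma tripart_perm (l : List Int) (p : Int) :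
    (l.filter (fun v => decide (v > p)) ++ (l.filter (fun v => decide (v = p)) ++ l.filter (fun v => decide (v < p)))).Perm l := by
  induction l with
  | nil => simp
  | cons x t ih =>
    rcases lt_trichotomy x p with hx | hx | hx
    · have h1 : ¬ (x > p) := by omega
      have h2 : x ≠ p := by omega
      simp only [List.filter_cons, hx, h1, h2, decide_true, decide_false, if_true]
      rw [← List.append_assoc]
      exact List.perm_middle.trans ((by simpa [List.append_assoc] using ih :
        ((t.filter (fun v => decide (v > p)) ++ t.filter (fun v => decide (v = p))) ++ t.filter (fun v => decide (v < p))).Perm t).cons x)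
    · subst hx
      simp only [List.filter_cons, gt_iff_lt, lt_irrefl, decide_false, Bool.false_eq_true,
        if_false, decide_true, if_true]
      exact List.perm_middle.trans (ih.cons x)
    · have h2 : x ≠ p := by omega
      have h3 : ¬ (x < p) := by omega
      simp only [List.filter_cons, hx, h2, h3, decide_true, decide_false, if_true]
      exact ih.cons x

-- the equal-to-pivot block is a replicate of the pivot
lemma filter_eq_replicate (l : List Int) (p : Int) :
    l.filter (fun v => decide (v = p)) = List.replicate (l.countP (fun v => decide (v = p))) p := by
  induction l with
  | nil => simp
  | cons x t ih =>
    by_cases hx : x = p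
    · subst hx; simp [ih, List.replicate_succ]
    · simp [hx, ih]

-- descSort splits along a pivot partition
lemma descSort_split (l : List Int) (p : Int) :
    descSort l = descSort (l.filter (fun v => decide (v > p)))
      ++ List.replicate (l.countP (fun v => decide (v = p))) p
      ++ descSort (l.filter (fun v => decide (v < p))) := by
  apply descSort_eq_of_perm
  · rw [List.append_assoc, ← filter_eq_replicate]
    exact ((descSort_perm _).append ((List.Perm.refl _).append (descSort_perm _))).trans (tripart_perm l p)
  · rw [List.append_assoc, List.pairwise_append, List.pairwise_append]
    refine ⟨descSort_pairwise _, ⟨?_, descSort_pairwise _, ?_⟩, ?_⟩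
    · exact List.pairwise_replicate.mpr (Or.inr le_rfl)
    · intro a ha b hb
      have ha' : a = p := List.eq_of_mem_replicate ha
      have hb' : b < p := by
        have := (descSort_perm _).mem_iff.mp hb
        simpa using (List.mem_filter.mp this).2
      omega
    · intro a ha b hb
      have ha' : p < a := by
        have := (descSort_perm _).mem_iff.mp ha
        simpa using (List.mem_filter.mp this).2
      rcases List.mem_append.mp hb with hb | hb
      · have : b = p := List.eq_of_mem_replicate hb; omega
      · have hb' : b < p := by
          have := (descSort_perm _).mem_iff.mp hb
          simpa using (List.mem_filter.mp this).2
        omega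

lemma sum_descSort (l : List Int) : (descSort l).sum = l.sum := (descSort_perm l).sum_eq

lemma length_descSort (l : List Int) : (descSort l).length = l.length := (descSort_perm l).length_eq

lemma tripart_length (l : List Int) (p : Int) :
    l.length = (l.filter (fun v => decide (v > p))).length + l.countP (fun v => decide (v = p))
      + (l.filter (fun v => decide (v < p))).length := by
  have h := (tripart_perm l p).length_eq
  rw [filter_eq_replicate] at h
  simp only [List.length_append, List.length_replicate] at h
  omega

-- correctness of the quickselect sum: sum of the k largest
lemma sumKLargest_eq (n : Nat) : ∀ (vals : List Int) (k total : Int), vals.length ≤ n →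
    0 ≤ k → k ≤ (vals.length : Int) →
    sumKLargest vals k total = total + takeSum vals k.toNat := by
  induction n with
  | zero =>
    intro vals k total hlen hk0 hkle
    have hv : vals = [] := List.eq_nil_of_length_eq_zero (by omega)
    subst hv
    have hk : k = 0 := by simp at hkle; omega
    subst hk
    rw [sumKLargest]; simp [takeSum]
  | succ m ih =>
    intro vals k total hlen hk0 hkle
    by_cases hkpos : k > 0
    · rw [sumKLargest, if_pos hkpos]
      by_cases hkall : k = (vals.length : Int)
      · rw [if_pos hkall, takeSum]
        have ht : k.toNat = (descSort vals).length := by rw [length_descSort]; omega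
        rw [ht, List.take_length, sum_descSort]
      · rw [if_neg hkall]
        split
        · rename_i heq
          exfalso
          rw [PySem.List.pyGet?_eq_none_iff] at heq
          apply heq
          have h2 : PySem.Int.floordiv (vals.length : Int) 2 = ((vals.length / 2 : Nat) : Int) := by
            exact_mod_cast PySem.Int.floordiv_natCast vals.length 2
          rw [h2]
          constructor <;> [omega; skip]
          have : vals.length / 2 < vals.length := Nat.div_lt_self (by omega) (by norm_num)
          omega
        · rename_i pivot heq
          have hmem : pivot ∈ vals := PySem.List.mem_of_pyGet?_eq_some (h := heq)
          have hAlt : (vals.filter (fun v => decide (v > pivot))).length < vals.length :=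
            List.length_filter_lt_length_iff_exists.mpr ⟨pivot, hmem, by simp⟩
          have hClt : (vals.filter (fun v => decide (v < pivot))).length < vals.length :=
            List.length_filter_lt_length_iff_exists.mpr ⟨pivot, hmem, by simp⟩
          have htri := tripart_length vals pivot
          have hsplit := descSort_split vals pivot
          have hlA : (descSort (vals.filter (fun v => decide (v > pivot)))).length
              = (vals.filter (fun v => decide (v > pivot))).length := length_descSort _
          by_cases h1 : k ≤ ((vals.filter (fun v => decide (v > pivot))).length : Int)
          · rw [if_pos h1, ih _ k total (by omega) hk0 (by omega)]
            congr 1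
            rw [takeSum, takeSum, hsplit,
              List.take_append_of_le_length (by simp only [List.length_append]; omega),
              List.take_append_of_le_length (by omega)]
          · rw [if_neg h1]
            by_cases h2 : k ≤ ((vals.filter (fun v => decide (v > pivot))).length : Int)
                + (vals.countP (fun v => decide (v = pivot)) : Int)
            · rw [if_pos h2, takeSum, hsplit,
                List.take_append_of_le_length (by simp only [List.length_append, List.length_replicate]; omega),
                List.take_append, List.take_of_length_le (by omega),
                List.sum_append, sum_descSort, List.take_replicate, List.sum_replicate]
              have hmin : min (k.toNat - (descSort (vals.filter (fun v => decide (v > pivot)))).length)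
                  (vals.countP (fun v => decide (v = pivot)))
                  = k.toNat - (vals.filter (fun v => decide (v > pivot))).length := by omega
              rw [hmin, nsmul_eq_mul]
              have hc : ((k.toNat - (vals.filter (fun v => decide (v > pivot))).length : Nat) : Int)
                  = k - (vals.filter (fun v => decide (v > pivot))).length := by omega
              rw [hc]; ring
            · have hlen2 : (descSort (vals.filter (fun v => decide (v > pivot)))
                  ++ List.replicate (vals.countP (fun v => decide (v = pivot))) pivot).length ≤ k.toNat := by
                simp only [List.length_append, List.length_replicate]; omega
              have hj : k.toNat - (descSort (vals.filter (fun v => decide (v > pivot)))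
                    ++ List.replicate (vals.countP (fun v => decide (v = pivot))) pivot).length
                  = (k - ((vals.filter (fun v => decide (v > pivot))).length : Int)
                      - (vals.countP (fun v => decide (v = pivot)) : Int)).toNat := by
                simp only [List.length_append, List.length_replicate]; omega
              rw [if_neg h2, ih _ _ _ (by omega) (by omega) (by omega),
                takeSum, takeSum, hsplit]
              conv_rhs => rw [List.take_append, List.take_of_length_le hlen2, hj]
              rw [List.sum_append, List.sum_append, sum_descSort, List.sum_replicate, nsmul_eq_mul]
              ring
    · have hk : k = 0 := by omega
      subst hk
      rw [sumKLargest]; simp [takeSum]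

lemma sumKLargest_nonpos (vals : List Int) (k total : Int) (hk : ¬ k > 0) :
    sumKLargest vals k total = total := by
  rw [sumKLargest, if_neg hk]

-- how many pairs A's countdown loop takes from reward1
def tk (n : Nat) (k : Int) : Nat := if 0 ≤ k ∧ k ≤ (n : Int) then k.toNat else n

lemma tk_cons (n : Nat) (k : Int) (hk : k ≠ 0) : tk (n + 1) k = tk n (k - 1) + 1 := by
  simp only [tk]; split_ifs <;> omega

lemma loopA : ∀ (ps : List (Int × Int)) (k r : Int),
    (ps.foldl pvstep (r, k)).1
      = r + ((ps.take (tk ps.length k)).map Prod.fst).sum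
          + ((ps.drop (tk ps.length k)).map Prod.snd).sum := by
  intro ps
  induction ps with
  | nil => intro k r; simp [tk]
  | cons p t ih =>
    intro k r
    by_cases hk : k = 0
    · subst hk
      have h0 : ∀ m : Nat, tk m 0 = 0 := by intro m; simp [tk]
      have hstep : pvstep (r, 0) p = (r + p.2, 0) := by simp [pvstep]
      rw [List.foldl_cons, hstep]
      simp only [h0, List.take_zero, List.drop_zero]
      have := ih 0 (r + p.2)
      simp only [h0, List.take_zero, List.drop_zero] at this
      simp [this]; ring
    · have hstep : pvstep (r, k) p = (r + p.1, k - 1) := by simp [pvstep, hk]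
      rw [List.foldl_cons, hstep, List.length_cons, tk_cons _ _ hk, List.take_succ_cons,
        List.drop_succ_cons]
      have := ih (k - 1) (r + p.1)
      simp [this]; ring

lemma sum_map_sub (qs : List (Int × Int)) :
    (qs.map (fun p => p.1 - p.2)).sum = (qs.map Prod.fst).sum - (qs.map Prod.snd).sum := by
  induction qs with
  | nil => simp
  | cons q t ih => simp [ih]; ring

lemma split_sum (ps : List (Int × Int)) (t : Nat) :
    ((ps.take t).map Prod.fst).sum + ((ps.drop t).map Prod.snd).sum
      = (ps.map Prod.snd).sum + ((ps.map (fun p => p.1 - p.2)).take t).sum := by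
  have hsnd : (ps.map Prod.snd).sum = ((ps.take t).map Prod.snd).sum + ((ps.drop t).map Prod.snd).sum := by
    rw [← List.sum_append, ← List.map_append, List.take_append_drop]
  rw [← List.map_take, sum_map_sub, hsnd]; ring

lemma sorted_diff (arr : List (Int × Int)) :
    (PySem.List.sorted arr (fun x => x.1 - x.2) true).map (fun p => p.1 - p.2)
      = descSort (arr.map (fun p => p.1 - p.2)) := by
  refine (descSort_eq_of_perm _ _ ?_ ?_).symm
  · exact (PySem.List.sorted_perm arr _ true).map _
  · rw [List.pairwise_map]
    exact PySem.List.sorted_pairwise_rev arr _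

-- A's value, in closed form over the zipped pairs
lemma miceAndCheese_closed (r1 r2 : List Int) (k : Int) :
    miceAndCheese r1 r2 k
      = ((r1.zip r2).map Prod.snd).sum
        + takeSum ((r1.zip r2).map (fun p => p.1 - p.2)) (tk (r1.zip r2).length k) := by
  unfold miceAndCheese
  simp only []
  set arr := r1.zip r2 with harr
  set sp := PySem.List.sorted arr (fun x => x.1 - x.2) true with hsp
  have hlen : sp.length = arr.length := PySem.List.length_sorted arr _ true
  rw [loopA, zero_add, split_sum]
  have hsnd : (sp.map Prod.snd).sum = (arr.map Prod.snd).sum :=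
    ((PySem.List.sorted_perm arr _ true).map Prod.snd).sum_eq
  rw [hsnd, sorted_diff, hlen]
  rfl

-- ===== VERDICT =====
theorem miceAndCheese_spec : Claim_unchanged_miceAndCheese := by
  intro r1 r2 k _
  unfold Spec_miceAndCheese
  intro hnd
  rw [miceAndCheese_closed]
  unfold miceAndCheese_alt
  simp only []
  set arr := r1.zip r2 with harr
  by_cases hk : 0 ≤ k
  · have hmin0 : (0 : Int) ≤ min k (arr.length : Int) := by
      have : (0 : Int) ≤ (arr.length : Int) := by positivity
      omega
    have hminle : min k (arr.length : Int) ≤ ((arr.map (fun p => p.1 - p.2)).length : Int) := by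
      rw [List.length_map]; exact min_le_right _ _
    have ht : tk arr.length k = (min k (arr.length : Int)).toNat := by
      rw [tk]; split_ifs <;> omega
    rw [sumKLargest_eq (arr.map (fun p => p.1 - p.2)).length _ _ _ le_rfl hmin0 hminle, zero_add, ht]

  · -- k < 0: outside D_ the two zipped totals are equal, so both sides are that total
    have hsum : (arr.map Prod.fst).sum = (arr.map Prod.snd).sum := by
      unfold D_miceAndCheese at hnd
      by_contra h
      exact hnd ⟨by omega, h⟩
    have htk : tk arr.length k = arr.length := by rw [tk]; split_ifs <;> omega
    have hfull : takeSum (arr.map (fun p => p.1 - p.2)) arr.length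
        = (arr.map (fun p => p.1 - p.2)).sum := by
      rw [takeSum, List.take_of_length_le (by rw [length_descSort]; simp), sum_descSort]
    rw [htk, hfull, sum_map_sub, hsum,
      sumKLargest_nonpos _ _ _ (by omega)]
    ring

theorem miceAndCheese_changed : Claim_changed_miceAndCheese := by
  unfold Claim_changed_miceAndCheese
  refine ⟨by decide, by decide, by decide, ?_, by decide⟩
  show miceAndCheese_alt [1] [0] (-1) = 0
  simp only [miceAndCheese_alt]
  rw [sumKLargest_nonpos _ _ _ (by decide)]
  decide

theorem miceAndCheese_tight : Claim_exact_miceAndCheese := by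
  intro r1 r2 k _ hd
  obtain ⟨hk, hne⟩ := hd
  rw [miceAndCheese_closed]
  unfold miceAndCheese_alt
  simp only []
  set arr := r1.zip r2 with harr
  have htk : tk arr.length k = arr.length := by rw [tk]; split_ifs <;> omega
  have hfull : takeSum (arr.map (fun p => p.1 - p.2)) arr.length
      = (arr.map (fun p => p.1 - p.2)).sum := by
    rw [takeSum, List.take_of_length_le (by rw [length_descSort]; simp), sum_descSort]
  rw [htk, hfull, sum_map_sub, sumKLargest_nonpos _ _ _ (by omega)]
  have hr : (arr.map (fun p => p.2)).sum = (arr.map Prod.snd).sum := rfl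
  rw [hr]
  intro h
  apply hne
  omega
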